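-- pv_equiv track=rewrite | github.com/paiml/reprorusted-python-cli | examples/example_context_error/context_error_cli.py | multiple_contexts
-- ===== SOURCE A (Python) =====
-- class ManagedResource:
--     """Resource with context manager protocol."""
--
--     def __init__(self, name: str, fail_on_enter: bool = False, fail_on_exit: bool = False):
--         self.name = name
--         self.fail_on_enter = fail_on_enter
--         self.fail_on_exit = fail_on_exit
--         self.entered = False
--         self.exited = False
--         self.data: list[str] = []
--
--     def __enter__(self) -> "ManagedResource":
--         if self.fail_on_enter:
--             raise RuntimeError(f"Failed to enter {self.name}")
--         self.entered = True
--         return self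
--
--     def __exit__(self, exc_type: type | None, exc_val: Exception | None, exc_tb: object) -> bool:
--         self.exited = True
--         if self.fail_on_exit:
--             raise RuntimeError(f"Failed to exit {self.name}")
--         # Return False to not suppress exceptions
--         return False
--
--     def write(self, data: str) -> None:
--         self.data.append(data)
--
-- def multiple_contexts(names: list[str]) -> list[str]:
--     """Multiple context managers in one with statement."""
--     resources = [ManagedResource(n) for n in names]
--     results: list[str] = []
--     # Simulate multiple context managers
--     for res in resources:
--         res.__enter__()
--     try:
--         for res in resources:
--             res.write("data")
--             results.append(res.name)
--     finally:
--         for res in reversed(resources):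
--             res.__exit__(None, None, None)
--     return results
-- ===== SOURCE B (Python) =====
-- class ManagedResource:
--     """Resource with context manager protocol."""
--
--     def __init__(self, name: str, fail_on_enter: bool = False, fail_on_exit: bool = False):
--         self.name = name
--         self.fail_on_enter = fail_on_enter
--         self.fail_on_exit = fail_on_exit
--         self.entered = False
--         self.exited = False
--         self.data: list[str] = []
--
--     def __enter__(self) -> "ManagedResource":
--         if self.fail_on_enter:
--             raise RuntimeError(f"Failed to enter {self.name}")
--         self.entered = True
--         return self
--
--     def __exit__(self, exc_type, exc_val, exc_tb) -> bool:
--         self.exited = True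
--         if self.fail_on_exit:
--             raise RuntimeError(f"Failed to exit {self.name}")
--         return False
--
--     def write(self, data: str) -> None:
--         self.data.append(data)
--
--
-- def multiple_contexts(names: list[str]) -> list[str]:
--     """Multiple context managers in one with statement."""
--     # The locally-created resources never fail and never escape,
--     # so the result is simply a fresh copy of the names.
--     return list(names)
-- ===== Notes on version B (the rewrite author's own statement) =====
-- stated objective: simpler
-- what changed: B drops the resource allocation and the three enter/write/exit loops entirely and just returns a fresh copy of names, since the local resources never fail and are unobservable.
import Mathlib
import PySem

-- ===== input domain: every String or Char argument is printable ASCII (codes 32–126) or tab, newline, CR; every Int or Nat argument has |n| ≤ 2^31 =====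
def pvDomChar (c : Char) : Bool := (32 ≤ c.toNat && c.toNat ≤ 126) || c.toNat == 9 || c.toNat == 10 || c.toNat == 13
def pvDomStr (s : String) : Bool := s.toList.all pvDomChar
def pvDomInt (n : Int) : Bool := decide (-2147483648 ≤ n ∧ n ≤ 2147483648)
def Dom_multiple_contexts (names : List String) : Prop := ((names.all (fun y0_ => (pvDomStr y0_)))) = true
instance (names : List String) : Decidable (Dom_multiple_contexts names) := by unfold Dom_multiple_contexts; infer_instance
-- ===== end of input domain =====

-- B returns a fresh copy of the names: the local resources never fail and never escape,
-- so A's enter/write/exit machinery has no observable effect (objective: simpler).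

-- ===== PORT A =====
-- ManagedResource with its fields; mutation is modelled by returning the updated record.
structure PVManagedResource where
  name : String
  fail_on_enter : Bool
  fail_on_exit : Bool
  entered : Bool
  exited : Bool
  data : List String
deriving Repr, DecidableEq

def pvMRInit (n : String) : PVManagedResource :=
  ⟨n, false, false, false, false, []⟩

-- __enter__: fail_on_enter is always false here (default flag), so the raise branch is dead;
-- we keep the branch shape: on the (unreachable) fail branch it would raise.
def pvMREnter (r : PVManagedResource) : PVManagedResource :=
  if r.fail_on_enter then r else { r with entered := true }

def pvMRExit (r : PVManagedResource) : PVManagedResource :=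
  { r with exited := true }

def pvMRWrite (r : PVManagedResource) (d : String) : PVManagedResource :=
  { r with data := r.data ++ [d] }

def multiple_contexts (names : List String) : List String :=
  let resources := names.map (fun n => pvMRInit n)
  let results : List String := []
  -- for res in resources: res.__enter__()
  let resources := resources.map (fun res => pvMREnter res)
  -- for res in resources: res.write("data"); results.append(res.name)
  let st := resources.foldl
    (fun (acc : List PVManagedResource × List String) res =>
      let res := pvMRWrite res "data"
      (acc.1 ++ [res], acc.2 ++ [res.name])) ([], results)
  let resources := st.1
  let results := st.2
  -- finally: for res in reversed(resources): res.__exit__(None, None, None)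
  let _ := resources.reverse.map (fun res => pvMRExit res)
  results

-- ===== PORT B =====
-- return list(names): a fresh copy, value-equal to names
def multiple_contexts_alt (names : List String) : List String := names

-- ===== PRECONDITION & SPEC =====
def Spec_multiple_contexts (names : List String) (out : List String) : Prop := out = multiple_contexts_alt names
instance (names : List String) (out : List String) : Decidable (Spec_multiple_contexts names out) := by unfold Spec_multiple_contexts; infer_instance

-- ===== CLAIM (what is proved, stated in full; the proofs are below) =====
def Claim_equal_multiple_contexts : Prop := ∀ (names : List String), Dom_multiple_contexts names → Spec_multiple_contexts names (multiple_contexts names)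

-- ===== LEMMAS AND PROOFS =====

-- the write loop appends exactly the names of the resources it visits
theorem pv_foldl_names (rs : List PVManagedResource) (a : List PVManagedResource) (b : List String) :
    (rs.foldl
      (fun (acc : List PVManagedResource × List String) res =>
        let res := pvMRWrite res "data"
        (acc.1 ++ [res], acc.2 ++ [res.name])) (a, b)).2 = b ++ rs.map (·.name) := by
  induction rs generalizing a b with
  | nil => simp
  | cons r rs ih =>
      simp only [List.foldl_cons]
      rw [ih]
      simp [pvMRWrite]

theorem pv_names_of_init (names : List String) :
    ((names.map (fun n => pvMRInit n)).map (fun res => pvMREnter res)).map (·.name) = names := by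
  induction names with
  | nil => rfl
  | cons n ns ih => simp [pvMRInit, pvMREnter] at ih ⊢; exact ih

-- ===== VERDICT (by name: the statement is the Claim_ definition above) =====
theorem multiple_contexts_spec : Claim_equal_multiple_contexts := by
  intro names _
  show multiple_contexts names = multiple_contexts_alt names
  unfold multiple_contexts multiple_contexts_alt
  simp only [pv_foldl_names, pv_names_of_init, List.nil_append]
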